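-- pv_equiv track=rewrite | github.com/Datacrew-Mahalaxmy/ocr-engine | src/utils.py | _fix_line_breaks
-- ===== SOURCE A (Python) =====
-- def _fix_line_breaks(text: str) -> str:
--     """Fix words broken by line breaks"""
--     if not text:
--         return text
--
--     # Replace newlines with spaces
--     text = text.replace('\n', ' ').replace('\r', ' ')
--
--     words = text.split()
--     if len(words) <= 1:
--         return text
--
--     fixed_words = []
--     i = 0
--
--     while i < len(words):
--         # Single letter + longer word (a bcd -> abcd)
--         if (i < len(words) - 1 and
--             len(words[i]) == 1 and
--             len(words[i+1]) > 1 and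
--             words[i].isalpha() and
--             words[i+1].isalpha()):
--             fixed_words.append(words[i] + words[i+1])
--             i += 2
--         else:
--             fixed_words.append(words[i])
--             i += 1
--
--     return ' '.join(fixed_words)
-- ===== SOURCE B (Python) =====
-- def _fix_line_breaks(text: str) -> str:
--     """Fix words broken by line breaks (lookbehind pass with a pending letter)"""
--     if not text:
--         return text
--
--     text = text.replace('\n', ' ').replace('\r', ' ')
--
--     words = text.split()
--     if len(words) <= 1:
--         return text
--
--     out = []
--     pending = None  # a stashed single alphabetic letter awaiting a word to glue onto
--     for w in words:
--         if pending is not None and len(w) > 1 and w.isalpha():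
--             out.append(pending + w)
--             pending = None
--         else:
--             if pending is not None:
--                 out.append(pending)
--                 pending = None
--             if len(w) == 1 and w.isalpha():
--                 pending = w
--             else:
--                 out.append(w)
--     if pending is not None:
--         out.append(pending)
--     return ' '.join(out)
-- ===== Notes on version B (the rewrite author's own statement) =====
-- stated objective: alternative
-- what changed: Replaced the index-based while loop with two-token lookahead (i += 2 on a merge) by a single lookbehind pass that carries a pending single alphabetic letter and flushes or glues it at each word.
import Mathlib
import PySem

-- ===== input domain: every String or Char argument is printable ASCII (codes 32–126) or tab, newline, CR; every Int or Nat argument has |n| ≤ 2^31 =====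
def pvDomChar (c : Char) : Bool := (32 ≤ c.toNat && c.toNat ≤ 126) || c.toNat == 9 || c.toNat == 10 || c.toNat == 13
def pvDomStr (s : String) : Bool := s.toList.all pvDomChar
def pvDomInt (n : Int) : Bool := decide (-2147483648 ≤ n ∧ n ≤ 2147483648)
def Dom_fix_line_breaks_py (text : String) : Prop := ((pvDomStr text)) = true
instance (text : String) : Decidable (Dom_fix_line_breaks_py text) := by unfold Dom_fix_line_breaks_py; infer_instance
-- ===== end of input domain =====

-- B replaces A's two-token lookahead while-loop (i += 2 on a merge) by a single lookbehind
-- pass carrying a stashed single letter; same return value, stated objective: alternative.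


-- ===== PORT A =====
-- A's while loop with lookahead: merge words[i]+words[i+1] and skip two, else keep one.
def fixA : List (List Char) → List (List Char)
  | [] => []
  | [w] => [w]
  | w :: v :: rest =>
    if w.length = 1 ∧ v.length > 1 ∧ PySem.Chars.strIsalpha w ∧ PySem.Chars.strIsalpha v
    then (w ++ v) :: fixA rest
    else w :: fixA (v :: rest)

def fix_line_breaks_py (text : String) : String :=
  if text = "" then text
  else
    let t := PySem.Chars.replace (PySem.Chars.replace text.toList ['\n'] [' ']) ['\r'] [' ']
    let words := PySem.Chars.split₀ t
    if words.length ≤ 1 then String.ofList t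
    else String.ofList (PySem.Chars.join [' '] (fixA words))

-- ===== PORT B =====
-- B's loop body: out/pending state, lookbehind.
def stepB (acc : List (List Char) × Option (List Char)) (w : List Char) :
    List (List Char) × Option (List Char) :=
  match acc with
  | (out, some p) =>
    if w.length > 1 ∧ PySem.Chars.strIsalpha w then (out ++ [p ++ w], none)
    else if w.length = 1 ∧ PySem.Chars.strIsalpha w then (out ++ [p], some w)
    else (out ++ [p, w], none)
  | (out, none) =>
    if w.length = 1 ∧ PySem.Chars.strIsalpha w then (out, some w)
    else (out ++ [w], none)

-- B's final 'if pending is not None: out.append(pending)'.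
def flushB (acc : List (List Char) × Option (List Char)) : List (List Char) :=
  match acc with
  | (out, some p) => out ++ [p]
  | (out, none) => out

def fix_line_breaks_py_alt (text : String) : String :=
  if text = "" then text
  else
    let t := PySem.Chars.replace (PySem.Chars.replace text.toList ['\n'] [' ']) ['\r'] [' ']
    let words := PySem.Chars.split₀ t
    if words.length ≤ 1 then String.ofList t
    else String.ofList (PySem.Chars.join [' '] (flushB (words.foldl stepB ([], none))))

-- ===== PRECONDITION & SPEC =====
def Spec_fix_line_breaks_py (text : String) (out : String) : Prop := out = fix_line_breaks_py_alt text
instance (text : String) (out : String) : Decidable (Spec_fix_line_breaks_py text out) := by unfold Spec_fix_line_breaks_py; infer_instance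

-- ===== CLAIM (what is proved, stated in full; the proofs are below) =====
def Claim_equal_fix_line_breaks_py : Prop := ∀ (text : String), Dom_fix_line_breaks_py text → Spec_fix_line_breaks_py text (fix_line_breaks_py text)

-- ===== LEMMAS AND PROOFS =====
theorem fixA_cons_of_not (w : List Char) (l : List (List Char))
    (h : ¬ (w.length = 1 ∧ PySem.Chars.strIsalpha w)) :
    fixA (w :: l) = w :: fixA l := by
  cases l with
  | nil => rfl
  | cons v r =>
    simp only [fixA]
    rw [if_neg]
    rintro ⟨h1, _, h3, _⟩
    exact h ⟨h1, h3⟩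

-- Invariant of B's fold against A's lookahead recursion, both pending states at once.
theorem fold_inv : ∀ (n : Nat) (l : List (List Char)), l.length ≤ n →
    (∀ out, flushB (l.foldl stepB (out, none)) = out ++ fixA l) ∧
    (∀ out p, p.length = 1 → PySem.Chars.strIsalpha p = true →
      flushB (l.foldl stepB (out, some p)) = out ++ fixA (p :: l)) := by
  intro n
  induction n with
  | zero =>
    intro l hl
    have : l = [] := List.eq_nil_of_length_eq_zero (Nat.le_zero.mp hl)
    subst this
    exact ⟨fun out => by simp [flushB, fixA], fun out p _ _ => by simp [flushB, fixA]⟩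
  | succ n ih =>
    intro l hl
    cases l with
    | nil => exact ⟨fun out => by simp [flushB, fixA], fun out p _ _ => by simp [flushB, fixA]⟩
    | cons w rest =>
      have hr : rest.length ≤ n := by simpa using Nat.succ_le_succ_iff.mp hl
      constructor
      · intro out
        by_cases c1 : w.length = 1 ∧ PySem.Chars.strIsalpha w
        · simp only [List.foldl_cons, stepB, if_pos c1]
          rw [(ih rest hr).2 out w c1.1 c1.2]
        · simp only [List.foldl_cons, stepB, if_neg c1]
          rw [(ih rest hr).1 (out ++ [w]), fixA_cons_of_not w rest c1]
          simp
      · intro out p hp1 hp2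
        by_cases m : w.length > 1 ∧ PySem.Chars.strIsalpha w
        · simp only [List.foldl_cons, stepB, if_pos m]
          rw [(ih rest hr).1 (out ++ [p ++ w])]
          have : fixA (p :: w :: rest) = (p ++ w) :: fixA rest := by
            simp only [fixA]; rw [if_pos ⟨hp1, m.1, hp2, m.2⟩]
          rw [this]; simp
        · by_cases c1 : w.length = 1 ∧ PySem.Chars.strIsalpha w
          · simp only [List.foldl_cons, stepB, if_neg m, if_pos c1]
            rw [(ih rest hr).2 (out ++ [p]) w c1.1 c1.2]
            have : fixA (p :: w :: rest) = p :: fixA (w :: rest) := by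
              simp only [fixA]; rw [if_neg]; rintro ⟨_, hw, _, _⟩; omega
            rw [this]; simp
          · simp only [List.foldl_cons, stepB, if_neg m, if_neg c1]
            rw [(ih rest hr).1 (out ++ [p, w])]
            have h2 : fixA (w :: rest) = w :: fixA rest := fixA_cons_of_not w rest c1
            have : fixA (p :: w :: rest) = p :: fixA (w :: rest) := by
              simp only [fixA]; rw [if_neg]; rintro ⟨_, hw, _, hq⟩; exact m ⟨hw, hq⟩
            rw [this, h2]; simp

-- ===== VERDICT (by name: the statement is the Claim_ definition above) =====
theorem fix_line_breaks_py_spec : Claim_equal_fix_line_breaks_py := by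
  intro text _
  unfold Spec_fix_line_breaks_py fix_line_breaks_py fix_line_breaks_py_alt
  by_cases h0 : text = ""
  · simp [h0]
  · simp only [if_neg h0]
    by_cases h1 : (PySem.Chars.split₀ (PySem.Chars.replace (PySem.Chars.replace text.toList ['\n'] [' ']) ['\r'] [' '])).length ≤ 1
    · simp [h1]
    · simp only [if_neg h1]
      congr 1
      congr 1
      rw [(fold_inv _ _ (Nat.le_refl _)).1 []]
      simp
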